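-- pv_equiv track=rewrite | github.com/anthonyrtw/merlin | merlin/core/utils.py | generate_all_fock_states
-- ===== SOURCE A (Python) =====
-- from typing import Generator, Union
-- from itertools import combinations, chain
--
-- def generate_all_fock_states(m, n, no_bunching = False, loss = False) -> Generator:
--     """
--     Generates all possible Fock states for m modes and n photons.
--
--     Args:
--         m: Number of modes
--         n: Number of photons
--         no_bunching: If `True`, only maximum one photon in each mode.
--         loss: Considers all lossy states.
--
--     """
--     if loss:
--         # Combine all generate_all_fock_states from n to 0.
--         yield from chain.from_iterable(
--             generate_all_fock_states(m, n_, no_bunching=no_bunching, loss=False)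
--             for n_ in reversed(range(n + 1)))
--         return
--
--     if no_bunching:
--         if n > m or n < 0:
--             return
--         for positions in combinations(range(m), n):
--             fock_state = [0] * m
--
--             for pos in positions:
--                 fock_state[pos] = 1
--             yield tuple(fock_state)
--
--     else:
--         if n == 0:
--             yield (0,) * m
--             return
--         if m == 1:
--             yield (n,)
--             return
--
--         for i in reversed(range(n + 1)):
--             for state in generate_all_fock_states(m-1, n-i):
--                 yield (i,) + state
-- ===== SOURCE B (Python) =====
-- from itertools import combinations
--
-- def generate_all_fock_states(m, n, no_bunching=False, loss=False):
--     """Same states as A; the bunching branch uses a flat stars-and-bars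
--     enumeration instead of recursion on the number of modes."""
--     if loss:
--         for n_ in reversed(range(n + 1)):
--             yield from generate_all_fock_states(m, n_, no_bunching, False)
--         return
--
--     if no_bunching:
--         if n > m or n < 0:
--             return
--         for positions in combinations(range(m), n):
--             yield tuple(1 if i in positions else 0 for i in range(m))
--     else:
--         if n == 0:
--             yield (0,) * m
--             return
--         total = n + m - 1
--         for bars in reversed(list(combinations(range(total), m - 1))):
--             prev = -1
--             state = []
--             for b in bars:
--                 state.append(b - prev - 1)
--                 prev = b
--             state.append(total - prev - 1)
--             yield tuple(state)
-- ===== Notes on version B (the rewrite author's own statement) =====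
-- stated objective: alternative
-- what changed: The bunching branch's recursion over modes is replaced by a single flat stars-and-bars loop: each reversed combination of bar positions is converted into a composition of n into m parts by successive gap sizes, which also subsumes A's m==1 special case.
-- outside the precondition, e.g. on generate_all_fock_states(0, -1, False, False): A returns [], B raises ValueError
import Mathlib
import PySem

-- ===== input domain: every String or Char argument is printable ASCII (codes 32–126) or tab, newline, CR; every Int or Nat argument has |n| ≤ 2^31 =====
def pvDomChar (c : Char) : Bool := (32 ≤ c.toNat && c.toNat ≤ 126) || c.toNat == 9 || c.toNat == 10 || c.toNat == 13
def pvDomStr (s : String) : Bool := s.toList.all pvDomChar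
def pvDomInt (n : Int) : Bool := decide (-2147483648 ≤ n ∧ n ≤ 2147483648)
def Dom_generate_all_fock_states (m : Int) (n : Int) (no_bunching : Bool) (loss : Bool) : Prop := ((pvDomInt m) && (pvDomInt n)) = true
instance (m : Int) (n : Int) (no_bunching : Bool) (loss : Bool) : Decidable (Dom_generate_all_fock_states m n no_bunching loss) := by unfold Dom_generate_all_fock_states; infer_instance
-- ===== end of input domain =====

-- B reimplements A's bunching branch with a flat stars-and-bars loop; equivalence of RETURN values
-- (both Pythons are generators, compared as the list of yielded tuples) on Pre_.

-- ===== PORT A =====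
-- itertools.combinations over an explicit element list, lexicographic order (used by both ports)
def pvCombos : List Int → Nat → List (List Int)
  | _, 0 => [[]]
  | [], _+1 => []
  | x :: xs, k+1 => (pvCombos xs k).map (fun c => x :: c) ++ pvCombos xs (k+1)

-- A's bunching recursion; the fuel only makes the recursion total on the Pre_-excluded
-- inputs (m ≤ 0, n ≠ 0) where the Python recurses without bound (RecursionError)
def pvABunch : Nat → Int → Int → List (List Int)
  | 0, _, _ => []
  | fuel+1, m, n =>
    if n = 0 then [List.replicate m.toNat 0]
    else if m = 1 then [[n]]
    else ((PySem.List.pyRange 0 (n+1) 1).reverse).flatMap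
      (fun i => (pvABunch fuel (m-1) (n-i)).map (fun s => i :: s))

-- the loss=False body of A
def pvACore (m n : Int) (nb : Bool) : List (List Int) :=
  if nb then
    if n > m ∨ n < 0 then []
    else (pvCombos (PySem.List.pyRange 0 m 1) n.toNat).map
      (fun ps => ps.foldl (fun st p => st.set p.toNat 1) (List.replicate m.toNat 0))
  else pvABunch (m.toNat + 1) m n

def generate_all_fock_states (m : Int) (n : Int) (no_bunching : Bool) (loss : Bool) : List (List Int) :=
  if loss then ((PySem.List.pyRange 0 (n+1) 1).reverse).flatMap (fun n_ => pvACore m n_ no_bunching)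
  else pvACore m n no_bunching

-- ===== PORT B =====
-- the loss=False body of B: stars and bars, gaps computed by the Python loop's foldl
def pvBCore (m n : Int) (nb : Bool) : List (List Int) :=
  if nb then
    if n > m ∨ n < 0 then []
    else (pvCombos (PySem.List.pyRange 0 m 1) n.toNat).map
      (fun ps => (PySem.List.pyRange 0 m 1).map (fun i => if i ∈ ps then (1:Int) else 0))
  else if n = 0 then [List.replicate m.toNat 0]
  else
    (pvCombos (PySem.List.pyRange 0 (n + m - 1) 1) (m-1).toNat).reverse.map
      (fun bars =>
        let r := bars.foldl (fun (acc : List Int × Int) b => (acc.1 ++ [b - acc.2 - 1], b)) ([], -1)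
        r.1 ++ [(n + m - 1) - r.2 - 1])

def generate_all_fock_states_alt (m : Int) (n : Int) (no_bunching : Bool) (loss : Bool) : List (List Int) :=
  if loss then ((PySem.List.pyRange 0 (n+1) 1).reverse).flatMap (fun n_ => pvBCore m n_ no_bunching)
  else pvBCore m n no_bunching

-- ===== PRECONDITION & SPEC =====
-- Pre_ excludes nonpositive mode counts m ≤ 0 combined with n ≠ 0 photons (outside the function's
-- natural domain): there A either recurses without bound (RecursionError, for n ≥ 1) or returns []
-- from a vacuous loop (n < 0, non-loss) where B's combinations(..., m-1) raises ValueError.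
def Pre_generate_all_fock_states (m : Int) (n : Int) (no_bunching : Bool) (loss : Bool) : Prop :=
  no_bunching = true ∨ 1 ≤ m ∨ n = 0 ∨ (n < 0 ∧ loss = true)
instance (m : Int) (n : Int) (no_bunching : Bool) (loss : Bool) : Decidable (Pre_generate_all_fock_states m n no_bunching loss) := by unfold Pre_generate_all_fock_states; infer_instance
def pvWitness_generate_all_fock_states : Int × Int × Bool × Bool := (3, 2, false, false)

def Spec_generate_all_fock_states (m : Int) (n : Int) (no_bunching : Bool) (loss : Bool) (out : List (List Int)) : Prop := out = generate_all_fock_states_alt m n no_bunching loss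
instance (m : Int) (n : Int) (no_bunching : Bool) (loss : Bool) (out : List (List Int)) : Decidable (Spec_generate_all_fock_states m n no_bunching loss out) := by unfold Spec_generate_all_fock_states; infer_instance

-- ===== CLAIM =====
def Claim_equal_generate_all_fock_states : Prop := ∀ (m : Int) (n : Int) (no_bunching : Bool) (loss : Bool), Dom_generate_all_fock_states m n no_bunching loss → Pre_generate_all_fock_states m n no_bunching loss → Spec_generate_all_fock_states m n no_bunching loss (generate_all_fock_states m n no_bunching loss)

-- ===== LEMMAS AND PROOFS =====

-- the clean composition list (A's bunching order), recursion on the number of modes as a Nat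
def pvComp : Nat → Int → List (List Int)
  | 0, _ => []
  | m+1, n =>
    if n = 0 then [List.replicate (m+1) 0]
    else if m = 0 then [[n]]
    else ((PySem.List.pyRange 0 (n+1) 1).reverse).flatMap
      (fun i => (pvComp m (n-i)).map (fun s => i :: s))

-- gap sizes between consecutive bars, recursively
def pvGaps (prev : Int) : List Int → Int → List Int
  | [], total => [total - prev - 1]
  | b :: bs, total => (b - prev - 1) :: pvGaps b bs total

theorem pvFoldl_gaps (bars : List Int) : ∀ (st : List Int) (prev total : Int),
    (bars.foldl (fun (acc : List Int × Int) b => (acc.1 ++ [b - acc.2 - 1], b)) (st, prev)).1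
      ++ [total - (bars.foldl (fun (acc : List Int × Int) b => (acc.1 ++ [b - acc.2 - 1], b)) (st, prev)).2 - 1]
    = st ++ pvGaps prev bars total := by
  induction bars with
  | nil => intro st prev total; simp [pvGaps]
  | cons b bs ih => intro st prev total; simp [List.foldl_cons, ih, pvGaps]

theorem pvCombos_eq_nil_of_lt : ∀ (l : List Int) (k : Nat), l.length < k → pvCombos l k = [] := by
  intro l
  induction l with
  | nil => intro k hk; cases k with
    | zero => omega
    | succ k => simp [pvCombos]
  | cons x xs ih =>
    intro k hk
    cases k with
    | zero => simp at hk
    | succ k =>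
      simp only [List.length_cons] at hk
      simp [pvCombos, ih k (by omega), ih (k+1) (by omega)]

theorem pvMem_of_mem_pvCombos : ∀ (l : List Int) (k : Nat) (ps : List Int),
    ps ∈ pvCombos l k → ∀ x ∈ ps, x ∈ l := by
  intro l
  induction l with
  | nil =>
    intro k ps h x hx
    cases k with
    | zero => simp [pvCombos] at h; subst h; simp at hx
    | succ k => simp [pvCombos] at h
  | cons a t ih =>
    intro k ps h x hx
    cases k with
    | zero => simp [pvCombos] at h; subst h; simp at hx
    | succ k =>
      simp only [pvCombos, List.mem_append, List.mem_map] at h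
      rcases h with ⟨c, hc, rfl⟩ | h
      · rcases List.mem_cons.1 hx with rfl | hx
        · exact List.mem_cons_self
        · exact List.mem_cons_of_mem _ (ih k c hc x hx)
      · exact List.mem_cons_of_mem _ (ih (k+1) ps h x hx)

theorem pvCombos_range_succ : ∀ (fuel : Nat) (a b : Int), (b - a).toNat ≤ fuel → ∀ (k : Nat),
    pvCombos (PySem.List.pyRange a b 1) (k+1)
      = (PySem.List.pyRange a b 1).flatMap (fun j => (pvCombos (PySem.List.pyRange (j+1) b 1) k).map (fun c => j :: c)) := by
  intro fuel
  induction fuel with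
  | zero =>
    intro a b hab k
    rw [PySem.List.pyRange_one_eq_nil (by omega)]
    simp [pvCombos]
  | succ fuel ih =>
    intro a b hab k
    by_cases hlt : a < b
    · rw [PySem.List.pyRange_one_cons hlt]
      simp only [pvCombos, List.flatMap_cons]
      rw [ih (a+1) b (by omega) k]
    · rw [PySem.List.pyRange_one_eq_nil (by omega)]
      simp [pvCombos]

-- A's recursion equals pvComp given enough fuel
theorem pvABunch_eq_pvComp : ∀ (fuel : Nat) (m n : Int), 1 ≤ m → m.toNat ≤ fuel →
    pvABunch (fuel+1) m n = pvComp m.toNat n := by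
  intro fuel
  induction fuel with
  | zero => intro m n hm hf; omega
  | succ f ih =>
    intro m n hm hf
    by_cases hn : n = 0
    · subst hn
      rw [show pvABunch (f+1+1) m 0 = [List.replicate m.toNat 0] from by simp [pvABunch]]
      rw [show m.toNat = (m-1).toNat + 1 from by omega]
      simp [pvComp]
    · by_cases hm1 : m = 1
      · subst hm1
        rw [show pvABunch (f+1+1) 1 n = [[n]] from by simp [pvABunch, hn]]
        rw [show (1:Int).toNat = 0 + 1 from rfl]
        simp [pvComp, hn]
      · have hk : m.toNat = (m-1).toNat + 1 := by omega
        have hm2 : (m-1).toNat ≠ 0 := by omega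
        have hm2' : m.toNat - 1 ≠ 0 := by omega
        rw [hk]
        rw [show pvABunch (f+1+1) m n
              = ((PySem.List.pyRange 0 (n+1) 1).reverse).flatMap
                  (fun i => (pvABunch (f+1) (m-1) (n-i)).map (fun s => i :: s)) from by
              simp [pvABunch, hn, hm1]]
        rw [show pvComp ((m-1).toNat+1) n
              = ((PySem.List.pyRange 0 (n+1) 1).reverse).flatMap
                  (fun i => (pvComp (m-1).toNat (n-i)).map (fun s => i :: s)) from by
              simp [pvComp, hn, hm2, hm2']]
        congr 1
        funext i
        rw [ih (m-1) (n-i) (by omega) (by omega)]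

-- pvComp unfolds to the flatMap form for every n ≥ 0 (including n = 0)
theorem pvComp_flat (k : Nat) (n : Int) (hn : 0 ≤ n) :
    pvComp (k+2) n = ((PySem.List.pyRange 0 (n+1) 1).reverse).flatMap
      (fun i => (pvComp (k+1) (n-i)).map (fun s => i :: s)) := by
  by_cases h0 : n = 0
  · subst h0
    rw [show PySem.List.pyRange 0 (0+1) 1 = [0] from PySem.List.pyRange_one_singleton 0]
    simp [pvComp, List.replicate_succ]
  · simp [pvComp, h0]

-- THE stars-and-bars lemma: reversed combinations of bar positions, turned into gap lists,
-- enumerate exactly pvComp (k+1) n in A's order, for any window start a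
theorem pvSB : ∀ (k : Nat) (n a : Int), 0 ≤ n →
    (pvCombos (PySem.List.pyRange a (a + n + k) 1) k).reverse.map
        (fun bars => pvGaps (a-1) bars (a + n + k))
      = pvComp (k+1) n := by
  intro k
  induction k with
  | zero =>
    intro n a hn
    rw [show pvCombos (PySem.List.pyRange a (a + n + (0:Nat)) 1) 0 = [[]] from by simp [pvCombos]]
    simp only [List.reverse_singleton, List.map_singleton]
    rw [show pvGaps (a-1) [] (a + n + ((0:Nat):Int)) = [a + n + ((0:Nat):Int) - (a-1) - 1] from rfl]
    rw [show a + n + ((0:Nat):Int) - (a-1) - 1 = n by push_cast; ring]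
    by_cases h0 : n = 0
    · subst h0; simp [pvComp]
    · simp [pvComp, h0]
  | succ k ih =>
    intro n a hn
    have hT : a + n + ((k+1:Nat):Int) = a + n + k + 1 := by push_cast; ring
    rw [hT]
    rw [pvCombos_range_succ ((a + n + k + 1) - a).toNat a (a + n + k + 1) le_rfl k]
    rw [PySem.List.pyRange_one_append a (a+n+1) (a+n+k+1) (by omega) (by omega)]
    rw [List.flatMap_append, List.reverse_append, List.map_append]
    have hright : ((PySem.List.pyRange (a+n+1) (a+n+k+1) 1).flatMap
        (fun j => (pvCombos (PySem.List.pyRange (j+1) (a+n+k+1) 1) k).map (fun c => j :: c))).reverse.map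
        (fun bars => pvGaps (a-1) bars (a + n + k + 1)) = [] := by
      have : (PySem.List.pyRange (a+n+1) (a+n+k+1) 1).flatMap
          (fun j => (pvCombos (PySem.List.pyRange (j+1) (a+n+k+1) 1) k).map (fun c => j :: c)) = [] := by
        rw [List.flatMap_eq_nil_iff]
        intro j hj
        rw [PySem.List.mem_pyRange_one] at hj
        rw [pvCombos_eq_nil_of_lt _ k (by rw [PySem.List.length_pyRange_one]; omega)]
        simp
      rw [this]; simp
    rw [hright, List.nil_append]
    -- left chunk
    rw [List.reverse_flatMap, List.map_flatMap, pvComp_flat k n hn]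
    rw [PySem.List.pyRange_one a (a+n+1), PySem.List.pyRange_one 0 (n+1)]
    rw [show ((a+n+1) - a).toNat = ((n+1) - 0).toNat from by omega]
    rw [← List.map_reverse, ← List.map_reverse, List.flatMap_map, List.flatMap_map]
    rw [List.flatMap_def, List.flatMap_def]
    congr 1
    apply List.map_congr_left
    intro km hkm
    rw [List.mem_reverse, List.mem_range] at hkm
    have hkmn : (km:Int) ≤ n := by omega
    -- left side for j = a + km
    simp only [Function.comp_apply]
    rw [← List.map_reverse, List.map_map]
    have hg : (fun bars => pvGaps (a-1) bars (a + n + (k:Int) + 1)) ∘ (fun c => (a + (km:Int)) :: c)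
        = (fun c => ((km:Int)) :: c) ∘ (fun bars => pvGaps (a + (km:Int)) bars (a + n + (k:Int) + 1)) := by
      funext bars
      simp only [Function.comp_apply, pvGaps]
      congr 1
      ring
    rw [hg, ← List.map_map]
    have hIH := ih (n - km) (a + (km:Int) + 1) (by omega)
    rw [show (a + (km:Int) + 1) + (n - (km:Int)) + (k:Int) = a + n + (k:Int) + 1 from by ring] at hIH
    rw [show (a + (km:Int) + 1) - 1 = a + (km:Int) from by ring] at hIH
    rw [hIH]
    simp

theorem pvSet_map_range (m p : Int) (S : List Int) (hp0 : 0 ≤ p) (hpm : p < m) :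
    ((PySem.List.pyRange 0 m 1).map (fun i => if i ∈ S then (1:Int) else 0)).set p.toNat 1
      = (PySem.List.pyRange 0 m 1).map (fun i => if i ∈ S ++ [p] then (1:Int) else 0) := by
  apply List.ext_getElem
  · simp
  · intro i h1 h2
    rw [List.getElem_set]
    rw [List.getElem_map, List.getElem_map]
    have hlen : i < (PySem.List.pyRange 0 m 1).length := by simpa using h2
    rw [PySem.List.getElem_pyRange_one]
    by_cases hip : p.toNat = i
    · have : (0:Int) + (i:Int) = p := by omega
      rw [if_pos hip, this]
      have : p ∈ S ++ [p] := by simp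
      rw [if_pos this]
    · have hne : (i:Int) ≠ p := by omega
      rw [if_neg hip]
      simp [List.mem_append, hne]

theorem pvIndicator_fold : ∀ (ps S : List Int) (m : Int), (∀ p ∈ ps, 0 ≤ p ∧ p < m) →
    ps.foldl (fun st p => st.set p.toNat 1)
        ((PySem.List.pyRange 0 m 1).map (fun i => if i ∈ S then (1:Int) else 0))
      = (PySem.List.pyRange 0 m 1).map (fun i => if i ∈ S ++ ps then (1:Int) else 0) := by
  intro ps
  induction ps with
  | nil => intro S m h; simp
  | cons p ps ih =>
    intro S m h
    rw [List.foldl_cons]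
    rw [pvSet_map_range m p S (h p List.mem_cons_self).1 (h p List.mem_cons_self).2]
    rw [ih (S ++ [p]) m (fun q hq => h q (List.mem_cons_of_mem _ hq))]
    simp [List.append_assoc]

theorem pvCore_eq (m n : Int) (nb : Bool) (h : nb = true ∨ 1 ≤ m ∨ n = 0) :
    pvACore m n nb = pvBCore m n nb := by
  cases nb with
  | true =>
    by_cases hg : n > m ∨ n < 0
    · simp [pvACore, pvBCore, hg]
    · simp only [pvACore, pvBCore, if_true, hg, if_false]
      apply List.map_congr_left
      intro ps hps
      have hmem := pvMem_of_mem_pvCombos _ _ _ hps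
      have hb : ∀ p ∈ ps, 0 ≤ p ∧ p < m := by
        intro p hp
        have := hmem p hp
        rw [PySem.List.mem_pyRange_one] at this
        omega
      have h0 : (List.replicate m.toNat (0:Int))
          = (PySem.List.pyRange 0 m 1).map (fun i => if i ∈ ([]:List Int) then (1:Int) else 0) := by
        simp [List.map_const', PySem.List.length_pyRange_one]
      rw [h0, pvIndicator_fold ps [] m hb]
      simp
  | false =>
    have h' : 1 ≤ m ∨ n = 0 := by tauto
    by_cases hn : n = 0
    · subst hn
      simp only [pvACore, pvBCore, Bool.false_eq_true, if_false, if_pos rfl]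
      simp [pvABunch]
    · have hm : 1 ≤ m := by tauto
      simp only [pvACore, pvBCore, Bool.false_eq_true, if_false, if_neg hn]
      rw [pvABunch_eq_pvComp m.toNat m n hm le_rfl]
      have hfold : (fun (bars : List Int) =>
            (bars.foldl (fun (acc : List Int × Int) b => (acc.1 ++ [b - acc.2 - 1], b)) ([], -1)).1
              ++ [(n + m - 1) - (bars.foldl (fun (acc : List Int × Int) b => (acc.1 ++ [b - acc.2 - 1], b)) ([], -1)).2 - 1])
          = (fun bars => pvGaps (-1) bars (n + m - 1)) := by
        funext bars
        simpa using pvFoldl_gaps bars [] (-1) (n + m - 1)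
      by_cases hneg : n < 0
      · by_cases hm1 : m = 1
        · subst hm1
          rw [show ((1:Int) - 1).toNat = 0 from rfl]
          rw [show pvCombos (PySem.List.pyRange 0 (n + 1 - 1) 1) 0 = [[]] from by simp [pvCombos]]
          rw [show (1:Int).toNat = 0 + 1 from rfl]
          simp [pvComp, hn, pvGaps]
        · have hm2 : (2:Int) ≤ m := by omega
          rw [pvCombos_eq_nil_of_lt _ (m-1).toNat (by rw [PySem.List.length_pyRange_one]; omega)]
          rw [show m.toNat = (m.toNat - 1) + 1 from by omega]
          have hk0 : m.toNat - 1 ≠ 0 := by omega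
          simp [pvComp, hn, hk0, PySem.List.pyRange_one_eq_nil (show n + 1 ≤ 0 by omega)]
      · have hn0 : 0 ≤ n := by omega
        have hsb := pvSB (m-1).toNat n 0 hn0
        rw [show (0:Int) + n + (((m-1).toNat:Nat):Int) = n + m - 1 from by omega] at hsb
        rw [show (0:Int) - 1 = -1 from by ring] at hsb
        rw [hfold, hsb]
        rw [show m.toNat = (m-1).toNat + 1 from by omega]

theorem pvLoss_pre (m n : Int) (nb : Bool) (h : nb = true ∨ 1 ≤ m ∨ n = 0 ∨ n < 0) :
    ((PySem.List.pyRange 0 (n+1) 1).reverse).flatMap (fun n_ => pvACore m n_ nb)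
      = ((PySem.List.pyRange 0 (n+1) 1).reverse).flatMap (fun n_ => pvBCore m n_ nb) := by
  rw [List.flatMap_def, List.flatMap_def]
  congr 1
  apply List.map_congr_left
  intro n_ hn_
  rw [List.mem_reverse, PySem.List.mem_pyRange_one] at hn_
  apply pvCore_eq
  rcases h with h | h | h | h
  · exact Or.inl h
  · exact Or.inr (Or.inl h)
  · exact Or.inr (Or.inr (by omega))
  · exact Or.inr (Or.inr (by omega))

-- ===== VERDICT =====
theorem generate_all_fock_states_spec : Claim_equal_generate_all_fock_states := by
  intro m n nb loss _ hpre
  unfold Spec_generate_all_fock_states generate_all_fock_states generate_all_fock_states_alt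
  rcases hpre with h | h | h | ⟨h, hl⟩
  · cases loss <;> simp only [if_true, if_false, Bool.false_eq_true, reduceIte]
    · exact pvCore_eq m n nb (Or.inl h)
    · exact pvLoss_pre m n nb (Or.inl h)
  · cases loss <;> simp only [if_true, if_false, Bool.false_eq_true, reduceIte]
    · exact pvCore_eq m n nb (Or.inr (Or.inl h))
    · exact pvLoss_pre m n nb (Or.inr (Or.inl h))
  · cases loss <;> simp only [if_true, if_false, Bool.false_eq_true, reduceIte]
    · exact pvCore_eq m n nb (Or.inr (Or.inr h))
    · exact pvLoss_pre m n nb (Or.inr (Or.inr (Or.inl h)))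
  · subst hl
    simp only [if_true]
    exact pvLoss_pre m n nb (Or.inr (Or.inr (Or.inr h)))
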